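-- pv_equiv track=rewrite | github.com/antmicro/f4pga-docs | f4pga/utils/yosys_split_inouts.py | get_free_net
-- ===== SOURCE A (Python) =====
-- def get_free_net(nets):
--     """
--     Given a set of used net indices, returns a new, free index.
--
--     >>> get_free_net({0, 1, 2,    4, 5, 6})
--     3
--     >>> get_free_net({0, 1, 2, 3, 4, 5, 6})
--     7
--     """
--     sorted_nets = sorted(list(nets))
--
--     # Find a gap in the sequence
--     for i in range(len(nets) - 1):
--         n0 = sorted_nets[i]
--         n1 = sorted_nets[i + 1]
--         if n1 != (n0 + 1):
--             return n0 + 1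
--
--     # No gap was found, return max + 1.
--     return sorted_nets[-1] + 1
-- ===== SOURCE B (Python) =====
-- def get_free_net(nets):
--     """
--     Given a set of used net indices, returns a new, free index.
--     """
--     s = sorted(nets)
--     lo = s[0]
--     # Some index in [lo, lo + len(s)] is always free: len(s) + 1 candidates,
--     # at most len(s) of them used.  The smallest free one is the answer.
--     return min(set(range(lo, lo + len(s) + 1)) - set(nets))
-- ===== Notes on version B (the rewrite author's own statement) =====
-- stated objective: simpler
-- what changed: Replaces the indexed pairwise gap scan over the sorted list by taking the minimum of the complement set(range(lo, lo+len+1)) - nets.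
import Mathlib
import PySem

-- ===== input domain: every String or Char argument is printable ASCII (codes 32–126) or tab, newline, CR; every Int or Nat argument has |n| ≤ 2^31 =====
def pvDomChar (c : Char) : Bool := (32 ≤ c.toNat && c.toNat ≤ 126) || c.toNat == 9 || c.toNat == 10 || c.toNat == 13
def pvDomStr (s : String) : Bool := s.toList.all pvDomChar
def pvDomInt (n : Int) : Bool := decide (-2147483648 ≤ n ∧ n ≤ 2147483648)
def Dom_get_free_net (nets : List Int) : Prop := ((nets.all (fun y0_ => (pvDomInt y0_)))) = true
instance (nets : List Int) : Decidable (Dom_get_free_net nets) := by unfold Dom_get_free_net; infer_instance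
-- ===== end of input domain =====

-- B replaces A's indexed pairwise gap scan over the sorted list by taking the
-- minimum of the complement set(range(lo, lo+len+1)) - nets (objective: simpler).

-- ===== PORT A =====
-- the for-loop over i in range(len(nets)-1) with its early return
def getFreeNetLoop (s : List Int) : List Int → Option Int
  | [] => none
  | i :: rest =>
    let n0 := PySem.List.pyGetD s i 0
    let n1 := PySem.List.pyGetD s (i + 1) 0
    if n1 ≠ n0 + 1 then some (n0 + 1) else getFreeNetLoop s rest

def get_free_net (nets : List Int) : Int :=
  let sorted_nets := PySem.List.sorted nets (fun x => x) false
  match getFreeNetLoop sorted_nets (PySem.List.pyRange 0 ((nets.length : Int) - 1) 1) with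
  | some r => r
  | none => PySem.List.pyGetD sorted_nets (-1) 0 + 1

-- ===== PORT B =====
def get_free_net_alt (nets : List Int) : Int :=
  let s := PySem.List.sorted nets (fun x => x) false
  let lo := PySem.List.pyGetD s 0 0
  let cand := PySem.Set.diff
    (PySem.Set.ofList (PySem.List.pyRange lo (lo + (s.length : Int) + 1) 1))
    (PySem.Set.ofList nets)
  (PySem.List.min? cand (fun x => x)).getD 0

-- ===== PRECONDITION & SPEC =====
-- Pre_ excludes the empty input, where both A and B raise IndexError; the
-- argument is a Python set, so its list of elements is duplicate-free (Nodup).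
def Pre_get_free_net (nets : List Int) : Prop := nets ≠ [] ∧ nets.Nodup
instance (nets : List Int) : Decidable (Pre_get_free_net nets) := by
  unfold Pre_get_free_net; infer_instance

def pvWitness_get_free_net : List Int := [0, 1, 2, 4, 5]

def Spec_get_free_net (nets : List Int) (out : Int) : Prop := out = get_free_net_alt nets
instance (nets : List Int) (out : Int) : Decidable (Spec_get_free_net nets out) := by
  unfold Spec_get_free_net; infer_instance

-- ===== CLAIM (what is proved, stated in full; the proofs are below) =====
def Claim_equal_get_free_net : Prop :=
  ∀ (nets : List Int), Dom_get_free_net nets → Pre_get_free_net nets →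
    Spec_get_free_net nets (get_free_net nets)

-- ===== LEMMAS AND PROOFS =====

-- structural form of A's index-driven gap scan
def gapScan : List Int → Option Int
  | x :: y :: t => if y ≠ x + 1 then some (x + 1) else gapScan (y :: t)
  | _ => none

-- A's result as a function of the sorted list
def gapRes (x : Int) (t : List Int) : Int :=
  match gapScan (x :: t) with
  | some v => v
  | none => (x :: t).getLast (by simp) + 1

lemma loop_eq_gapScan (s : List Int) (i : Nat) :
    getFreeNetLoop s (PySem.List.pyRange i ((s.length : Int) - 1) 1) = gapScan (s.drop i) := by
  suffices H : ∀ d i : Nat, s.length - 1 - i = d →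
      getFreeNetLoop s (PySem.List.pyRange i ((s.length : Int) - 1) 1) = gapScan (s.drop i) from
    H _ i rfl
  intro d
  induction d with
  | zero =>
    intro i h0
    rw [PySem.List.pyRange_one_eq_nil (by omega)]
    match hd : s.drop i with
    | [] => simp [getFreeNetLoop, gapScan]
    | [a] => simp [getFreeNetLoop, gapScan]
    | a :: b :: tl =>
      exfalso
      have := congrArg List.length hd
      simp [List.length_drop] at this
      omega
  | succ d ih =>
    intro i h0
    have hi1 : i + 1 < s.length := by omega
    have hi : i < s.length := by omega
    rw [PySem.List.pyRange_one_cons (by omega)]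
    have hcast : (i : Int) + 1 = ((i + 1 : Nat) : Int) := by push_cast; ring
    have hdrop1 : s.drop i = s[i] :: s.drop (i + 1) := List.drop_eq_getElem_cons hi
    have hdrop2 : s.drop (i + 1) = s[i + 1] :: s.drop (i + 2) := List.drop_eq_getElem_cons hi1
    show (if PySem.List.pyGetD s ((i : Int) + 1) 0 ≠ PySem.List.pyGetD s (i : Int) 0 + 1
      then some (PySem.List.pyGetD s (i : Int) 0 + 1)
      else getFreeNetLoop s (PySem.List.pyRange ((i : Int) + 1) ((s.length : Int) - 1) 1)) = _
    rw [hcast, PySem.List.pyGetD_natCast, PySem.List.pyGetD_natCast,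
      ih (i + 1) (by omega), hdrop1, hdrop2]
    rw [List.getD_eq_getElem s 0 hi, List.getD_eq_getElem s 0 hi1]
    rw [gapScan]

-- the four facts characterizing A's result on a strictly increasing list
lemma gap_props (x : Int) (t : List Int) (h : (x :: t).Pairwise (· < ·)) :
    x < gapRes x t ∧ gapRes x t ≤ x + (t.length : Int) + 1 ∧ gapRes x t ∉ (x :: t) ∧
      ∀ y : Int, x ≤ y → y < gapRes x t → y ∈ (x :: t) := by
  induction t generalizing x with
  | nil =>
    refine ⟨by simp [gapRes, gapScan], by simp [gapRes, gapScan], by simp [gapRes, gapScan], ?_⟩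
    intro y h1 h2
    simp [gapRes, gapScan] at h2 ⊢
    omega
  | cons y t ih =>
    have hxy : x < y := (List.pairwise_cons.mp h).1 y (by simp)
    have ht : (y :: t).Pairwise (· < ·) := (List.pairwise_cons.mp h).2
    by_cases hgap : y = x + 1
    · -- no gap at the head: recurse
      have hres : gapRes x (y :: t) = gapRes y t := by
        simp [gapRes, gapScan, hgap]
      obtain ⟨p1, p2, p3, p4⟩ := ih y ht
      refine ⟨by omega, ?_, ?_, ?_⟩
      · rw [hres]; simp only [List.length_cons]; push_cast; omega
      · rw [hres]
        intro hmem
        rcases List.mem_cons.mp hmem with h' | h'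
        · omega
        · exact p3 (by simpa using h')
      · intro z h1 h2
        rw [hres] at h2
        rcases eq_or_lt_of_le h1 with h1 | h1
        · simp [← h1]
        · have : z ∈ (y :: t) := p4 z (by omega) h2
          simp only [List.mem_cons] at this ⊢
          tauto
    · -- gap at the head: result is x + 1
      have hres : gapRes x (y :: t) = x + 1 := by
        simp [gapRes, gapScan, hgap]
      have hall : ∀ z ∈ (y :: t), y ≤ z := by
        intro z hz
        rcases List.mem_cons.mp hz with rfl | hz
        · omega
        · exact le_of_lt ((List.pairwise_cons.mp ht).1 z hz)
      refine ⟨by omega, ?_, ?_, ?_⟩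
      · rw [hres]; simp only [List.length_cons]; push_cast; omega
      · rw [hres]
        intro hmem
        rcases List.mem_cons.mp hmem with h' | h'
        · omega
        · have := hall _ h'
          omega
      · intro z h1 h2
        rw [hres] at h2
        have : z = x := by omega
        simp [this]

-- ===== VERDICT (by name: the statement is the Claim_ definition above) =====
theorem get_free_net_spec : Claim_equal_get_free_net := by
  intro nets _ hpre
  obtain ⟨hne, hnd⟩ := hpre
  have hperm : (PySem.List.sorted nets (fun x => x) false).Perm nets :=
    PySem.List.sorted_perm ..
  have hsne : PySem.List.sorted nets (fun x => x) false ≠ [] := by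
    intro h
    rw [h] at hperm
    exact hne hperm.symm.eq_nil
  obtain ⟨x, t, hs⟩ := List.exists_cons_of_ne_nil hsne
  have hlen : (PySem.List.sorted nets (fun x => x) false).length = nets.length :=
    PySem.List.length_sorted ..
  have hle : (PySem.List.sorted nets (fun x => x) false).Pairwise (fun a b => a ≤ b) :=
    PySem.List.sorted_pairwise ..
  have hsnd : (PySem.List.sorted nets (fun x => x) false).Nodup := hperm.nodup_iff.mpr hnd
  have hlt : (PySem.List.sorted nets (fun x => x) false).Pairwise (· < ·) :=
    (hle.and hsnd).imp (fun h => lt_of_le_of_ne h.1 h.2)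
  rw [hs] at hlt hperm
  obtain ⟨p1, p2, p3, p4⟩ := gap_props x t hlt
  -- A's side equals gapRes x t
  have hL := loop_eq_gapScan (PySem.List.sorted nets (fun x => x) false) 0
  rw [hlen] at hL
  simp only [Nat.cast_zero, List.drop_zero] at hL
  have hA : get_free_net nets = gapRes x t := by
    unfold get_free_net
    show (match getFreeNetLoop (PySem.List.sorted nets (fun x => x) false)
        (PySem.List.pyRange 0 ((nets.length : Int) - 1) 1) with
      | some r => r
      | none => PySem.List.pyGetD (PySem.List.sorted nets (fun x => x) false) (-1) 0 + 1) =
      gapRes x t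
    rw [hL, hs, PySem.List.pyGetD_neg_one (x :: t) 0 (by simp)]
    rfl
  -- B's side: the minimum of the candidate set equals gapRes x t
  have hB : get_free_net_alt nets = gapRes x t := by
    unfold get_free_net_alt
    show (PySem.List.min? (PySem.Set.diff
        (PySem.Set.ofList (PySem.List.pyRange
          (PySem.List.pyGetD (PySem.List.sorted nets (fun x => x) false) 0 0)
          (PySem.List.pyGetD (PySem.List.sorted nets (fun x => x) false) 0 0 +
            ((PySem.List.sorted nets (fun x => x) false).length : Int) + 1) 1))
        (PySem.Set.ofList nets)) (fun x => x)).getD 0 = gapRes x t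
    rw [hs, PySem.List.pyGetD_zero_cons]
    have hmem : ∀ z : Int,
        z ∈ PySem.Set.diff
          (PySem.Set.ofList (PySem.List.pyRange x (x + ((x :: t).length : Int) + 1) 1))
          (PySem.Set.ofList nets) ↔
        (x ≤ z ∧ z < x + ((x :: t).length : Int) + 1) ∧ z ∉ nets := by
      intro z
      rw [PySem.Set.mem_diff, PySem.Set.mem_ofList, PySem.Set.mem_ofList,
        PySem.List.mem_pyRange_one]
    have hrmem : gapRes x t ∈ PySem.Set.diff
        (PySem.Set.ofList (PySem.List.pyRange x (x + ((x :: t).length : Int) + 1) 1))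
        (PySem.Set.ofList nets) := by
      rw [hmem]
      refine ⟨⟨by omega, ?_⟩, fun h => p3 (hperm.mem_iff.mpr h)⟩
      simp only [List.length_cons]; push_cast; omega
    cases hmin : PySem.List.min? (PySem.Set.diff
        (PySem.Set.ofList (PySem.List.pyRange x (x + ((x :: t).length : Int) + 1) 1))
        (PySem.Set.ofList nets)) (fun x => x) with
    | none =>
      exfalso
      rw [PySem.List.min?_eq_none_iff] at hmin
      rw [hmin] at hrmem
      exact absurd hrmem List.not_mem_nil
    | some m =>
      have hm := PySem.List.min?_mem hmin
      have hmin' := PySem.List.min?_isMin hmin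
      have h1 : m ≤ gapRes x t := hmin' _ hrmem
      have h2 : gapRes x t ≤ m := by
        rw [hmem] at hm
        by_contra hc
        exact hm.2 (hperm.mem_iff.mp (p4 m hm.1.1 (by omega)))
      simp only [Option.getD_some]
      omega
  unfold Spec_get_free_net
  rw [hA, hB]
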